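-- pv_equiv track=rewrite | github.com/packetqc/K_STM32_MCP | Knowledge/K_MIND/scripts/routing_display.py | build_chain_tree
-- ===== SOURCE A (Python) =====
-- def build_chain_tree(routes, route_name, visited=None, depth=0, max_depth=5):
--     if visited is None:
--         visited = set()
--     result = []
--     is_cycle = route_name in visited
--     result.append((depth, route_name, is_cycle))
--     if is_cycle or depth >= max_depth:
--         return result
--     visited = visited | {route_name}
--     route = routes.get(route_name, {})
--     for dep in route.get('chain_deps', []):
--         result.extend(build_chain_tree(routes, dep, visited, depth + 1, max_depth))
--     return result
-- ===== SOURCE B (Python) =====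
-- def build_chain_tree(routes, route_name, visited=None, depth=0, max_depth=5):
--     result = []
--     stack = [(depth, route_name, set() if visited is None else visited)]
--     while stack:
--         d, name, vis = stack.pop()
--         is_cycle = name in vis
--         result.append((d, name, is_cycle))
--         if is_cycle or d >= max_depth:
--             continue
--         nv = vis | {name}
--         for dep in reversed(routes.get(name, {}).get('chain_deps', [])):
--             stack.append((d + 1, dep, nv))
--     return result
-- ===== Notes on version B (the rewrite author's own statement) =====
-- stated objective: alternative
-- what changed: Replaced the recursive tree walk (one Python call per node, lists concatenated up the call stack) by an iterative DFS with an explicit stack: children are pushed in reversed order so popping preserves the exact left-to-right preorder, and each stack entry carries its branch's visited set.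
import Mathlib
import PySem

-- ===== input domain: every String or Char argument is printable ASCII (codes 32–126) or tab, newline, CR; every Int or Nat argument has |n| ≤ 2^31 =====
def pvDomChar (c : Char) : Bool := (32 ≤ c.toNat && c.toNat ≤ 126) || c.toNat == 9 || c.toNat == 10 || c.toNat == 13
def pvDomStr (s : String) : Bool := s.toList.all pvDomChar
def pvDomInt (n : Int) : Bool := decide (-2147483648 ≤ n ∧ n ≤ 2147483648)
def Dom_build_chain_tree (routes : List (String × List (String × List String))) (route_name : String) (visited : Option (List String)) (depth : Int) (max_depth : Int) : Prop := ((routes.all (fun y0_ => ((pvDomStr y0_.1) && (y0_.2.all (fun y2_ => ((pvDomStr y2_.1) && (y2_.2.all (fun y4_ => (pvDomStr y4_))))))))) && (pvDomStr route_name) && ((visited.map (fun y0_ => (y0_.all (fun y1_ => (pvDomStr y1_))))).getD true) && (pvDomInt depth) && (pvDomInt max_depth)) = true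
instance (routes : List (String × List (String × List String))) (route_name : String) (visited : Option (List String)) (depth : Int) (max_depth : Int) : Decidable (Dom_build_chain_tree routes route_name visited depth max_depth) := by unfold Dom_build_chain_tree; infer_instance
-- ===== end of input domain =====

-- B replaces A's recursion by an iterative explicit-stack DFS pushing children in reversed
-- order (same preorder output); a structural alternative, not claimed faster.
-- Both ports recurse on a Nat fuel that only makes them total in Lean (the fuel-exhausted
-- arms are unreachable for the fuel the wrappers pass); everything else is the Python, step for step.

-- shared helper: routes.get(name, {}).get('chain_deps', [])  (this lookup appears in both Pythons)
def chainDeps (routes : List (String × List (String × List String))) (name : String) : List String :=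
  PySem.Dict.getD (PySem.Dict.mk (PySem.Dict.getD (PySem.Dict.mk routes) name [])) "chain_deps" []

-- ===== PORT A =====
-- recursive core of A (Python's recursive calls always pass a real set, never None);
-- the for-loop with result.extend is the flatten of the mapped recursive calls, in order.
-- fuel = (max_depth - depth).toNat: the inner match is only a totality guard (depth < max_depth there).
def bctA (routes : List (String × List (String × List String))) (name : String) (vis : List String) (depth : Int) (max_depth : Int) : Nat → List (Int × String × Bool)
  | 0 =>
    if PySem.Set.contains vis name || depth ≥ max_depth then
      [(depth, name, PySem.Set.contains vis name)]
    else []  -- unreachable: the wrappers keep fuel = (max_depth - depth).toNat > 0 here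
  | n + 1 =>
    if PySem.Set.contains vis name || depth ≥ max_depth then
      [(depth, name, PySem.Set.contains vis name)]
    else
      (depth, name, PySem.Set.contains vis name) ::
        ((chainDeps routes name).map
          (fun dep => bctA routes dep (PySem.Set.add vis name) (depth + 1) max_depth n)).flatten

def build_chain_tree (routes : List (String × List (String × List String))) (route_name : String) (visited : Option (List String)) (depth : Int) (max_depth : Int) : List (Int × String × Bool) :=
  bctA routes route_name (visited.getD []) depth max_depth (max_depth - depth).toNat

-- ===== PORT B =====
-- bound on the number of children any stack entry can push (used only to size B's fuel)
def maxDeps (routes : List (String × List (String × List String))) : Nat :=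
  routes.foldr (fun p m => max (PySem.Dict.getD (PySem.Dict.mk p.2) "chain_deps" ([] : List String)).length m) 0

-- iterative DFS loop of B: pop an entry, emit it, push its children (leftmost on top).
-- fuel bounds the iteration count; the fuel-exhausted arm is unreachable for the wrapper's fuel.
def bctB (routes : List (String × List (String × List String))) (max_depth : Int) : Nat → List (Int × String × List String) → List (Int × String × Bool) → List (Int × String × Bool)
  | _, [], result => result
  | 0, _ :: _, result => result  -- unreachable: the wrapper passes fuel ≥ the number of iterations
  | fuel + 1, (d, name, vis) :: rest, result =>
    if PySem.Set.contains vis name || d ≥ max_depth then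
      bctB routes max_depth fuel rest (result ++ [(d, name, PySem.Set.contains vis name)])
    else
      bctB routes max_depth fuel
        ((chainDeps routes name).map (fun dep => (d + 1, dep, PySem.Set.add vis name)) ++ rest)
        (result ++ [(d, name, PySem.Set.contains vis name)])

def build_chain_tree_alt (routes : List (String × List (String × List String))) (route_name : String) (visited : Option (List String)) (depth : Int) (max_depth : Int) : List (Int × String × Bool) :=
  bctB routes max_depth ((maxDeps routes + 1) ^ (max_depth - depth).toNat)
    [(depth, route_name, visited.getD [])] []

-- ===== PRECONDITION & SPEC =====
def Spec_build_chain_tree (routes : List (String × List (String × List String))) (route_name : String) (visited : Option (List String)) (depth : Int) (max_depth : Int) (out : List (Int × String × Bool)) : Prop := out = build_chain_tree_alt routes route_name visited depth max_depth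
instance (routes : List (String × List (String × List String))) (route_name : String) (visited : Option (List String)) (depth : Int) (max_depth : Int) (out : List (Int × String × Bool)) : Decidable (Spec_build_chain_tree routes route_name visited depth max_depth out) := by unfold Spec_build_chain_tree; infer_instance

-- ===== CLAIM (what is proved, stated in full; the proofs are below) =====
def Claim_equal_build_chain_tree : Prop := ∀ (routes : List (String × List (String × List String))) (route_name : String) (visited : Option (List String)) (depth : Int) (max_depth : Int), Dom_build_chain_tree routes route_name visited depth max_depth → Spec_build_chain_tree routes route_name visited depth max_depth (build_chain_tree routes route_name visited depth max_depth)

-- ===== LEMMAS AND PROOFS =====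

lemma chainDeps_length_le (routes : List (String × List (String × List String))) (name : String) :
    (chainDeps routes name).length ≤ maxDeps routes := by
  induction routes with
  | nil => simp [chainDeps, maxDeps, PySem.Dict.getD, PySem.Dict.get?]
  | cons p rest ih =>
    obtain ⟨k, v⟩ := p
    simp only [chainDeps, maxDeps, List.foldr, PySem.Dict.getD_eq_get?_getD,
      PySem.Dict.get?_mk_cons] at *
    by_cases h : (k == name) = true
    · simp [h]
    · simp only [h, Bool.false_eq_true, if_false]
      exact le_trans ih (le_max_right _ _)

-- weight of a pending stack entry: an upper bound (exact fuel of A's recursion) on the number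
-- of loop iterations that entry can still cause
def wSum (routes : List (String × List (String × List String))) (max_depth : Int) (stack : List (Int × String × List String)) : Nat :=
  (stack.map (fun e => (maxDeps routes + 1) ^ (max_depth - e.1).toNat)).sum

lemma wSum_children_lt (routes : List (String × List (String × List String))) (max_depth d : Int) (name : String) (vis : List String) (hd : d < max_depth) :
    wSum routes max_depth ((chainDeps routes name).map (fun dep => (d + 1, dep, PySem.Set.add vis name)))
      < (maxDeps routes + 1) ^ (max_depth - d).toNat := by
  have hconst : wSum routes max_depth ((chainDeps routes name).map (fun dep => (d + 1, dep, PySem.Set.add vis name)))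
      = (chainDeps routes name).length * (maxDeps routes + 1) ^ (max_depth - (d + 1)).toNat := by
    unfold wSum
    rw [List.map_map]
    generalize chainDeps routes name = l
    induction l with
    | nil => simp
    | cons x xs ih =>
      simp only [List.map_cons, List.sum_cons, List.length_cons, ih, Function.comp_apply]
      ring
  rw [hconst]
  have hf : (max_depth - (d + 1)).toNat + 1 = (max_depth - d).toNat := by omega
  rw [← hf, pow_succ]
  have hp : 0 < (maxDeps routes + 1) ^ (max_depth - (d + 1)).toNat := Nat.pow_pos (by omega)
  calc (chainDeps routes name).length * (maxDeps routes + 1) ^ (max_depth - (d + 1)).toNat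
      ≤ maxDeps routes * (maxDeps routes + 1) ^ (max_depth - (d + 1)).toNat :=
        Nat.mul_le_mul_right _ (chainDeps_length_le routes name)
    _ < (maxDeps routes + 1) ^ (max_depth - (d + 1)).toNat * (maxDeps routes + 1) := by
        rw [Nat.mul_comm]
        exact Nat.mul_lt_mul_of_pos_left (by omega) hp

-- loop invariant: with enough fuel the stack loop appends, after the accumulator, A's preorder
-- listing of every pending stack entry (at A's exact fuel), left to right
lemma bctB_inv (routes : List (String × List (String × List String))) (max_depth : Int) (fuel : Nat) (stack : List (Int × String × List String)) (acc : List (Int × String × Bool))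
    (hfuel : wSum routes max_depth stack ≤ fuel) :
    bctB routes max_depth fuel stack acc
      = acc ++ (stack.map (fun e => bctA routes e.2.1 e.2.2 e.1 max_depth (max_depth - e.1).toNat)).flatten := by
  induction fuel generalizing stack acc with
  | zero =>
    match stack with
    | [] => simp [bctB]
    | (d, name, vis) :: rest =>
      exfalso
      have h1 : 1 ≤ (maxDeps routes + 1) ^ (max_depth - d).toNat := Nat.one_le_pow _ _ (by omega)
      simp only [wSum, List.map_cons, List.sum_cons, Nat.le_zero] at hfuel
      omega
  | succ n ih =>
    match stack with
    | [] => simp [bctB]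
    | (d, name, vis) :: rest =>
      have h1 : 1 ≤ (maxDeps routes + 1) ^ (max_depth - d).toNat := Nat.one_le_pow _ _ (by omega)
      have hrest : wSum routes max_depth rest ≤ n := by
        simp only [wSum, List.map_cons, List.sum_cons] at hfuel ⊢
        omega
      by_cases hc : (PySem.Set.contains vis name || decide (d ≥ max_depth)) = true
      · rw [show bctB routes max_depth (n + 1) ((d, name, vis) :: rest) acc
            = bctB routes max_depth n rest (acc ++ [(d, name, PySem.Set.contains vis name)]) by
          simp only [bctB, hc, if_true]]
        rw [ih rest _ hrest]
        simp only [List.map_cons, List.flatten_cons]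
        rw [show bctA routes name vis d max_depth (max_depth - d).toNat
            = [(d, name, PySem.Set.contains vis name)] by
          cases hn : (max_depth - d).toNat <;> simp only [bctA] <;> rw [if_pos hc]]
        simp
      · have hc' := hc
        simp only [Bool.or_eq_true, decide_eq_true_eq, not_or, Bool.not_eq_true, ge_iff_le,
          not_le] at hc'
        obtain ⟨hcf, hd⟩ := hc'
        have hchild : wSum routes max_depth
            ((chainDeps routes name).map (fun dep => (d + 1, dep, PySem.Set.add vis name)) ++ rest) ≤ n := by
          have := wSum_children_lt routes max_depth d name vis hd
          simp only [wSum, List.map_cons, List.sum_cons, List.map_append, List.sum_append] at *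
          omega
        rw [show bctB routes max_depth (n + 1) ((d, name, vis) :: rest) acc
            = bctB routes max_depth n
                ((chainDeps routes name).map (fun dep => (d + 1, dep, PySem.Set.add vis name)) ++ rest)
                (acc ++ [(d, name, PySem.Set.contains vis name)]) by
          simp only [bctB]; rw [if_neg hc]]
        rw [ih _ _ hchild]
        obtain ⟨t, ht⟩ : ∃ t, (max_depth - d).toNat = t + 1 := ⟨(max_depth - d).toNat - 1, by omega⟩
        have htt : t = (max_depth - (d + 1)).toNat := by omega
        simp only [List.map_cons, List.flatten_cons]
        rw [show bctA routes name vis d max_depth (max_depth - d).toNat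
            = (d, name, PySem.Set.contains vis name) ::
                ((chainDeps routes name).map
                  (fun dep => bctA routes dep (PySem.Set.add vis name) (d + 1) max_depth
                    ((max_depth - (d + 1)).toNat))).flatten by
          rw [ht, htt]; simp only [bctA]; rw [if_neg hc]]
        simp only [List.map_append, List.flatten_append, List.map_map]
        simp [Function.comp_def]

-- ===== VERDICT (by name: the statement is the Claim_ definition above) =====
theorem build_chain_tree_spec : Claim_equal_build_chain_tree := by
  intro routes route_name visited depth max_depth _
  unfold Spec_build_chain_tree build_chain_tree build_chain_tree_alt
  rw [bctB_inv routes max_depth _ _ _ (by simp [wSum])]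
  simp
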